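-- pv_equiv track=rewrite | github.com/victormenaut/cl | intention_modeling copy/leave_1_out.py | cluster_one_hot_dict_whole
-- ===== SOURCE A (Python) =====
-- def cluster_one_hot_dict_whole(train_vals):
--     cluster_one_hot_mapping = {}
--     counter = 0
--     for val in train_vals:
--         for cluster in val:
--             if cluster in cluster_one_hot_mapping:
--                 pass
--             else:
--                 cluster_one_hot_mapping[cluster] = counter
--                 counter += 1
--
--     return cluster_one_hot_mapping
-- ===== SOURCE B (Python) =====
-- def cluster_one_hot_dict_whole(train_vals):
--     flat = [c for val in train_vals for c in val]
--     first = {c: i for i, c in reversed(list(enumerate(flat)))}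
--     uniq = sorted(first, key=first.get)
--     return {c: i for i, c in enumerate(uniq)}
-- ===== Notes on version B (the rewrite author's own statement) =====
-- stated objective: alternative
-- what changed: Instead of streaming through the nested loops with a counter and a membership test, B builds the first-occurrence position of every cluster by a single BACK-TO-FRONT dict comprehension over the reversed flattened stream (earlier writes overwrite later ones), then SORTS the distinct clusters by that position and assigns indices by enumerate; correct because first-occurrence positions are distinct, so the sort deterministically reproduces first-appearance order.
import Mathlib
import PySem

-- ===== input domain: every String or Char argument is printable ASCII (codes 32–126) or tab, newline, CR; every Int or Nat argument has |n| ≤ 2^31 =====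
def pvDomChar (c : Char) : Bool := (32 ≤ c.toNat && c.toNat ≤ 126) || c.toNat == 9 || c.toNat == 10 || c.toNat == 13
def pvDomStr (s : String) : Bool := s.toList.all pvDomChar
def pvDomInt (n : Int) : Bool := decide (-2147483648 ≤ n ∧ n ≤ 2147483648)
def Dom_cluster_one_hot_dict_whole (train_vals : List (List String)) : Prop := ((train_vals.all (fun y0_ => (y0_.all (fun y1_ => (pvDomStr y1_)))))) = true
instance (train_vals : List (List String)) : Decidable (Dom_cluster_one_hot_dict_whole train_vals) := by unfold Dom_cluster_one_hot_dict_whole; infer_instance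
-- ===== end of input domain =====

-- B rebuilds the mapping in staged passes: a back-to-front fold records each cluster's
-- first-occurrence position, the distinct clusters are sorted by that position, then
-- enumerated; alternative algorithm, not faster.

-- ===== PORT A =====
-- the loop body: one cluster processed against the (dict, counter) state
def pvStepA (st : PySem.Dict String Int × Int) (cluster : String) : PySem.Dict String Int × Int :=
  if st.1.contains cluster then st
  else (st.1.insert cluster st.2, st.2 + 1)

def cluster_one_hot_dict_whole (train_vals : List (List String)) : List (String × Int) :=
  (train_vals.foldl (fun st val => val.foldl pvStepA st) (PySem.Dict.empty, 0)).1.items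

-- ===== PORT B =====
-- {c: i for i, c in reversed(list(enumerate(flat)))}: a dict comprehension is a fold of inserts
def pvFirst (flat : List String) : PySem.Dict String Int :=
  ((PySem.List.enumerate flat).reverse).foldl (fun d p => d.insert p.2 p.1) PySem.Dict.empty

-- key=first.get: every sort key is a key of `first`, so Python's .get never yields None;
-- the .getD 0 only strips the Option.
def cluster_one_hot_dict_whole_alt (train_vals : List (List String)) : List (String × Int) :=
  let flat := train_vals.flatMap (fun val => val)
  let first := pvFirst flat
  let uniq := PySem.List.sorted first.keys (key := fun c => (first.get? c).getD 0)
  (PySem.List.enumerate uniq).map (fun p => (p.2, p.1))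

-- ===== PRECONDITION & SPEC =====
def Spec_cluster_one_hot_dict_whole (train_vals : List (List String)) (out : List (String × Int)) : Prop := out = cluster_one_hot_dict_whole_alt train_vals
instance (train_vals : List (List String)) (out : List (String × Int)) : Decidable (Spec_cluster_one_hot_dict_whole train_vals out) := by unfold Spec_cluster_one_hot_dict_whole; infer_instance

-- ===== CLAIM (what is proved, stated in full; the proofs are below) =====
def Claim_equal_cluster_one_hot_dict_whole : Prop := ∀ (train_vals : List (List String)), Dom_cluster_one_hot_dict_whole train_vals → Spec_cluster_one_hot_dict_whole train_vals (cluster_one_hot_dict_whole train_vals)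

-- ===== LEMMAS AND PROOFS =====

-- the items a dict holds when it maps the distinct list s to indices 0,1,2,…
def pvIdx (s : List String) : List (String × Int) :=
  (PySem.List.enumerate s).map (fun p => (p.2, p.1))

lemma pvIdx_keys (s : List String) : (pvIdx s).map (·.1) = s := by
  simp [pvIdx]
  exact PySem.List.map_snd_enumerate s 0

lemma pvIdx_append (s : List String) (c : String) :
    pvIdx (s ++ [c]) = pvIdx s ++ [(c, (s.length : Int))] := by
  simp [pvIdx, PySem.List.enumerate_append, PySem.List.enumerate_cons, PySem.List.enumerate_nil]

-- the nested loop is the loop over the flattened stream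
lemma foldl_nested (train_vals : List (List String)) (st : PySem.Dict String Int × Int) :
    train_vals.foldl (fun st val => val.foldl pvStepA st) st
      = (train_vals.flatMap (fun val => val)).foldl pvStepA st := by
  induction train_vals generalizing st with
  | nil => rfl
  | cons v vs ih => simp [List.flatMap_cons, List.foldl_append, ih]

-- loop invariant: state = (dict of pvIdx s, |s|) for s the distinct clusters seen so far
lemma foldl_invariant (xs : List String) (d : PySem.Dict String Int) (s : List String)
    (hd : d.items = pvIdx s) :
    ((xs.foldl pvStepA (d, (s.length : Int))).1.items
        = pvIdx (xs.foldl PySem.Set.add s))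
    ∧ (xs.foldl pvStepA (d, (s.length : Int))).2
        = ((xs.foldl PySem.Set.add s).length : Int) := by
  induction xs generalizing d s with
  | nil => exact ⟨hd, rfl⟩
  | cons x xs ih =>
    have hkeys : d.keys = s := by
      have := pvIdx_keys s
      simpa [PySem.Dict.keys, hd] using this
    have hcont : d.contains x = decide (x ∈ s) := by
      rw [PySem.Dict.contains_eq_decide_mem_keys, hkeys]
    by_cases hx : x ∈ s
    · have h1 : pvStepA (d, (s.length : Int)) x = (d, (s.length : Int)) := by
        simp [pvStepA, hcont, hx]
      have h2 : PySem.Set.add s x = s := by simp [PySem.Set.add, PySem.Set.contains, hx]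
      simpa [List.foldl_cons, h1, h2] using ih d s hd
    · have h1 : pvStepA (d, (s.length : Int)) x
          = (d.insert x (s.length : Int), (s.length : Int) + 1) := by
        simp [pvStepA, hcont, hx]
      have h2 : PySem.Set.add s x = s ++ [x] := by
        simp [PySem.Set.add, PySem.Set.contains, hx]
      have hnc : d.contains x = false := by simp [hcont, hx]
      have hins : (d.insert x (s.length : Int)).items = pvIdx (s ++ [x]) := by
        rw [PySem.Dict.items_insert, hnc]
        simp [hd, pvIdx_append]
      have := ih (d.insert x (s.length : Int)) (s ++ [x]) hins
      simpa [List.foldl_cons, h1, h2, List.length_append] using this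

-- the ordered dedup appends a new element, drops a seen one
lemma dedup_append_singleton (xs : List String) (x : String) :
    PySem.List.dedup (xs ++ [x])
      = if x ∈ xs then PySem.List.dedup xs else PySem.List.dedup xs ++ [x] := by
  simp only [PySem.List.dedup_eq_ofList, PySem.Set.ofList_eq_foldl, List.foldl_append,
    List.foldl_cons, List.foldl_nil]
  by_cases hx : x ∈ xs
  · have : x ∈ xs.foldl PySem.Set.add [] := by
      rw [← PySem.Set.ofList_eq_foldl]; simpa [PySem.Set.mem_ofList] using hx
    simp [PySem.Set.add, PySem.Set.contains, this, hx]
  · have : x ∉ xs.foldl PySem.Set.add [] := by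
      rw [← PySem.Set.ofList_eq_foldl]; simpa [PySem.Set.mem_ofList] using hx
    simp [PySem.Set.add, PySem.Set.contains, this, hx]

-- first-occurrence positions strictly increase along the ordered dedup
lemma dedup_pairwise_index (xs : List String) :
    (PySem.List.dedup xs).Pairwise
      (fun a b => ((PySem.List.index? xs a).getD 0 : Nat) < (PySem.List.index? xs b).getD 0) := by
  induction xs using List.reverseRecOn with
  | nil => simp [PySem.List.dedup_eq_ofList, PySem.Set.ofList_eq_foldl]
  | append_singleton xs x ih =>
    have agree : ∀ a ∈ xs, PySem.List.index? (xs ++ [x]) a = PySem.List.index? xs a :=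
      fun a ha => PySem.List.index?_append_of_mem [x] ha
    have transported : (PySem.List.dedup xs).Pairwise
        (fun a b => ((PySem.List.index? (xs ++ [x]) a).getD 0 : Nat)
          < (PySem.List.index? (xs ++ [x]) b).getD 0) := by
      refine ih.imp_of_mem ?_
      intro a b ha hb h
      have ha' : a ∈ xs := (PySem.List.mem_dedup xs a).1 ha
      have hb' : b ∈ xs := (PySem.List.mem_dedup xs b).1 hb
      rw [agree a ha', agree b hb']; exact h
    rw [dedup_append_singleton]
    by_cases hx : x ∈ xs
    · simpa [hx] using transported
    · have hxi : PySem.List.index? (xs ++ [x]) x = some xs.length :=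
        PySem.List.index?_append_singleton_self xs x hx
      have hbound : ∀ a ∈ PySem.List.dedup xs,
          ((PySem.List.index? (xs ++ [x]) a).getD 0 : Nat)
            < (PySem.List.index? (xs ++ [x]) x).getD 0 := by
        intro a ha
        have ha' : a ∈ xs := (PySem.List.mem_dedup xs a).1 ha
        obtain ⟨k, hk⟩ : ∃ k, PySem.List.index? xs a = some k :=
          Option.isSome_iff_exists.mp (by
            have := PySem.List.index?_isSome_iff (xs := xs) (v := a)
            exact this.2 ha')
        obtain ⟨hklt, -⟩ := PySem.List.getElem_of_index?_eq_some hk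
        rw [agree a ha', hk, hxi]
        simpa using hklt
      simp only [hx, if_false]
      exact List.pairwise_append.2 ⟨transported, List.pairwise_singleton _ _,
        fun a ha b hb => by simpa [List.mem_singleton.1 hb] using hbound a ha⟩

-- value of the back-to-front dict build: the LAST insert (= earliest pair) wins
lemma get?_foldl_insert (l : List (Int × String)) (d : PySem.Dict String Int) (c : String) :
    (l.foldl (fun d p => d.insert p.2 p.1) d).get? c
      = match l.reverse.find? (fun p => p.2 == c) with
        | some p => some p.1
        | none => d.get? c := by
  induction l generalizing d with
  | nil => simp
  | cons p l ih =>
    rw [List.foldl_cons, ih, List.reverse_cons, List.find?_append]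
    cases h : l.reverse.find? (fun q => q.2 == c) with
    | some q => simp [Option.or]
    | none =>
      simp only [Option.or]
      by_cases hc : p.2 = c
      · simp [List.find?, hc]
      · have hb : (p.2 == c) = false := by simpa using hc
        simp only [List.find?, hb, PySem.Dict.get?_insert]
        rw [if_neg (fun hcp => hc hcp.symm)]

-- searching the enumerated stream finds the first-occurrence index
lemma find?_enumerate (xs : List String) (c : String) (s : Int) :
    (PySem.List.enumerate xs s).find? (fun p => p.2 == c)
      = (PySem.List.index? xs c).map (fun k => (s + (k : Int), c)) := by
  induction xs generalizing s with
  | nil =>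
    simp [PySem.List.enumerate, PySem.List.index?_eq_idxOf?]
  | cons x xs ih =>
    rw [PySem.List.enumerate_cons]
    by_cases hx : x = c
    · subst hx
      rw [PySem.List.index?_cons_self]
      simp [List.find?]
    · have hne : (x == c) = false := by simpa using hx
      rw [PySem.List.index?_cons_of_ne xs hx]
      simp only [List.find?, hne, ih (s + 1)]
      cases ho : PySem.List.index? xs c with
      | none => simp
      | some k =>
        have h1 : s + 1 + (k : Int) = s + ((k + 1 : Nat) : Int) := by push_cast; ring
        show some ((s + 1 + (k : Int), c)) = some ((s + ((k + 1 : Nat) : Int), c))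
        rw [h1]

lemma first_get? (flat : List String) (c : String) (k : Nat)
    (hk : PySem.List.index? flat c = some k) :
    (pvFirst flat).get? c = some (k : Int) := by
  unfold pvFirst
  rw [get?_foldl_insert, List.reverse_reverse]
  have := find?_enumerate flat c 0
  rw [hk] at this
  rw [this]
  simp

lemma first_keys (flat : List String) :
    (pvFirst flat).keys = PySem.Set.ofList flat.reverse := by
  unfold pvFirst
  have h := PySem.Dict.keys_foldl_insert_key ((PySem.List.enumerate flat).reverse)
    (fun p => p.2) (fun _ p => p.1) (PySem.Dict.empty : PySem.Dict String Int)
  have hmap : ((PySem.List.enumerate flat).reverse).map (fun p => p.2) = flat.reverse := by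
    rw [List.map_reverse, PySem.List.map_snd_enumerate]
  rw [hmap] at h
  have hupd : PySem.Set.update (PySem.Dict.empty : PySem.Dict String Int).keys flat.reverse
      = PySem.Set.ofList flat.reverse := by
    simp [PySem.Set.update, PySem.Set.ofList_eq_foldl, PySem.Dict.empty, PySem.Dict.keys]
  rw [← hupd]
  exact h

-- sorting the dict's keys by first-occurrence position recovers the ordered dedup
lemma sorted_keys_by_first (flat : List String) :
    PySem.List.sorted (pvFirst flat).keys (fun c => ((pvFirst flat).get? c).getD 0)
      = PySem.List.dedup flat := by
  refine PySem.List.sorted_eq_of_perm_of_pairwise_lt _ (PySem.List.dedup flat) _ ?_ ?_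
  · rw [first_keys, PySem.List.dedup_eq_ofList]
    refine List.perm_of_nodup_nodup_toFinset_eq (PySem.Set.nodup_ofList _)
      (PySem.Set.nodup_ofList _) ?_
    ext a
    simp [PySem.Set.mem_ofList]
  · refine (dedup_pairwise_index flat).imp_of_mem ?_
    intro a b ha hb h
    have ha' : a ∈ flat := (PySem.List.mem_dedup flat a).1 ha
    have hb' : b ∈ flat := (PySem.List.mem_dedup flat b).1 hb
    obtain ⟨ka, hka⟩ : ∃ k, PySem.List.index? flat a = some k :=
      Option.isSome_iff_exists.mp ((PySem.List.index?_isSome_iff flat a).2 ha')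
    obtain ⟨kb, hkb⟩ : ∃ k, PySem.List.index? flat b = some k :=
      Option.isSome_iff_exists.mp ((PySem.List.index?_isSome_iff flat b).2 hb')
    rw [hka, hkb] at h
    rw [first_get? flat a ka hka, first_get? flat b kb hkb]
    simpa using h

theorem cluster_one_hot_dict_whole_spec_aux (train_vals : List (List String)) :
    cluster_one_hot_dict_whole train_vals = cluster_one_hot_dict_whole_alt train_vals := by
  unfold cluster_one_hot_dict_whole cluster_one_hot_dict_whole_alt
  rw [foldl_nested]
  have hA := (foldl_invariant (train_vals.flatMap (fun val => val)) PySem.Dict.empty []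
    (by simp [pvIdx, PySem.List.enumerate_nil, PySem.Dict.empty])).1
  simp only [List.length_nil, Nat.cast_zero] at hA
  rw [hA]
  show pvIdx _ = List.map (fun p => (p.2, p.1)) (PySem.List.enumerate
    (PySem.List.sorted (pvFirst (train_vals.flatMap (fun val => val))).keys
      (fun c => ((pvFirst (train_vals.flatMap (fun val => val))).get? c).getD 0)))
  rw [sorted_keys_by_first, PySem.List.dedup_eq_ofList, PySem.Set.ofList_eq_foldl]
  rfl

-- ===== VERDICT (by name: the statement is the Claim_ definition above) =====
theorem cluster_one_hot_dict_whole_spec : Claim_equal_cluster_one_hot_dict_whole := by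
  intro tv _
  exact cluster_one_hot_dict_whole_spec_aux tv
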